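-- pv_equiv track=rewrite | github.com/ElvisNjaramba/Wocco-Greymoon | greymoon_backend/base/services/fb_groups_scraper_service.py | _inject_group_url
-- ===== SOURCE A (Python) =====
-- def _inject_group_url(posts: list[dict], chunk_urls: list[str]) -> list[dict]:
--     """Tag posts with groupUrl if the actor didn't include it."""
--     if not posts or not chunk_urls:
--         return posts
--     posts_per_group = max(1, len(posts) // len(chunk_urls))
--     for i, post in enumerate(posts):
--         if not post.get("groupUrl") and not post.get("group_url"):
--             group_idx = min(i // posts_per_group, len(chunk_urls) - 1)
--             post["groupUrl"] = chunk_urls[group_idx]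
--     return posts
-- ===== SOURCE B (Python) =====
-- def _inject_group_url(posts: list[dict], chunk_urls: list[str]) -> list[dict]:
--     """Tag posts with groupUrl if the actor didn't include it."""
--     if not posts or not chunk_urls:
--         return posts
--     posts_per_group = max(1, len(posts) // len(chunk_urls))
--     # Stream through the posts with a countdown: after posts_per_group posts,
--     # advance to the next chunk URL (the last URL absorbs the remainder).
--     urls = list(chunk_urls)
--     remaining = posts_per_group
--     for post in posts:
--         if remaining == 0 and len(urls) > 1:
--             urls.pop(0)
--             remaining = posts_per_group
--         remaining -= 1
--         if all(not post.get(k) for k in ("groupUrl", "group_url")):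
--             post["groupUrl"] = urls[0]
--     return posts
-- ===== Notes on version B (the rewrite author's own statement) =====
-- stated objective: alternative
-- what changed: B replaces A's per-post index arithmetic (i // posts_per_group capped with min) by a single streaming pass that carries a countdown and a shrinking copy of the URL list, popping to the next URL when the countdown expires and always tagging with the current head.
import Mathlib
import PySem

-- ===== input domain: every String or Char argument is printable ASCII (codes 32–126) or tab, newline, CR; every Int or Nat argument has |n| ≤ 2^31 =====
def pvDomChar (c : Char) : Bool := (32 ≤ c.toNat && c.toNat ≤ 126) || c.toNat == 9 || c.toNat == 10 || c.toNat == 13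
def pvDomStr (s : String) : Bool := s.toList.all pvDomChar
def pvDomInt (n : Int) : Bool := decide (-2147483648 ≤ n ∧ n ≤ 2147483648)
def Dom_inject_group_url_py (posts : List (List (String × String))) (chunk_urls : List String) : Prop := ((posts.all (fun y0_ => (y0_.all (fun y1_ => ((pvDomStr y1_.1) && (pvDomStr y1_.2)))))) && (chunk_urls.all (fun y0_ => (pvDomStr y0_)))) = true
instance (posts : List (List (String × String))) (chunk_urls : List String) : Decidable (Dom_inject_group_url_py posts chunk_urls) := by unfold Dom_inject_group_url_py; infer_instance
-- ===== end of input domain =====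

-- B replaces A's per-post index arithmetic (min(i // pp, G-1)) by a streaming pass
-- with a countdown and a shrinking URL list; objective: alternative decomposition.
-- Both programs mutate the post dicts in place and return the same list object;
-- the equivalence proved here is about the returned value.

-- ===== PORT A =====
-- "not post.get(k)": get returns None or the string; both falsy cases collapse to "".
def pvNoGroupA (post : List (String × String)) : Bool :=
  ((PySem.Dict.mk post).get? "groupUrl").getD "" == "" &&
  ((PySem.Dict.mk post).get? "group_url").getD "" == ""

def inject_group_url_py (posts : List (List (String × String))) (chunk_urls : List String) : List (List (String × String)) :=
  if posts.isEmpty || chunk_urls.isEmpty then posts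
  else
    let pp : Int := max 1 (PySem.Int.floordiv posts.length chunk_urls.length)
    -- the for-loop mutates each post independently: one map over enumerate
    (PySem.List.enumerate posts 0).map (fun ip =>
      if pvNoGroupA ip.2 then
        -- chunk index min(i // pp, G-1) is always in range, so pyGetD is exact here
        ((PySem.Dict.mk ip.2).insert "groupUrl"
          (PySem.List.pyGetD chunk_urls
            (min (PySem.Int.floordiv ip.1 pp) ((chunk_urls.length : Int) - 1)) "")).items
      else ip.2)

-- ===== PORT B =====
-- all(not post.get(k) for k in ("groupUrl", "group_url"))
def pvUrlMissing (post : List (String × String)) : Bool :=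
  ["groupUrl", "group_url"].all (fun k => ((PySem.Dict.mk post).get? k).getD "" == "")

-- the for-loop with mutable (urls, remaining) state: structural recursion over posts.
-- urls is never popped below one element, so urls[0] is headD (never the default).
def pvTagStream (pp : Int) : List (List (String × String)) → List String → Int → List (List (String × String))
  | [], _, _ => []
  | post :: rest, urls, remaining =>
    let pop := remaining == 0 && decide (1 < urls.length)
    let urls' := if pop then urls.tail else urls
    let rem' := (if pop then pp else remaining) - 1
    let post' := if pvUrlMissing post then
        ((PySem.Dict.mk post).insert "groupUrl" (urls'.headD "")).items
      else post
    post' :: pvTagStream pp rest urls' rem'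

def inject_group_url_py_alt (posts : List (List (String × String))) (chunk_urls : List String) : List (List (String × String)) :=
  if posts.isEmpty || chunk_urls.isEmpty then posts
  else
    let pp : Int := max 1 (PySem.Int.floordiv posts.length chunk_urls.length)
    pvTagStream pp posts chunk_urls pp

-- ===== PRECONDITION & SPEC =====
def Spec_inject_group_url_py (posts : List (List (String × String))) (chunk_urls : List String) (out : List (List (String × String))) : Prop := out = inject_group_url_py_alt posts chunk_urls
instance (posts : List (List (String × String))) (chunk_urls : List String) (out : List (List (String × String))) : Decidable (Spec_inject_group_url_py posts chunk_urls out) := by unfold Spec_inject_group_url_py; infer_instance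

-- ===== CLAIM (what is proved, stated in full; the proofs are below) =====
def Claim_equal_inject_group_url_py : Prop := ∀ (posts : List (List (String × String))) (chunk_urls : List String), Dom_inject_group_url_py posts chunk_urls → Spec_inject_group_url_py posts chunk_urls (inject_group_url_py posts chunk_urls)

-- ===== LEMMAS AND PROOFS =====

theorem pvUrlMissing_eq (post : List (String × String)) : pvUrlMissing post = pvNoGroupA post := by
  simp [pvUrlMissing, pvNoGroupA]

-- invariant of the streaming pass: entering iteration i the list is cu.drop d and the
-- countdown is (d+1)*pp - i; the url used at iteration i is cu[min(i/pp, G-1)]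
theorem list_headD_drop (l : List String) (d : Nat) : (l.drop d).headD "" = l.getD d "" := by
  rw [List.headD_eq_head?_getD, List.head?_drop, List.getD_eq_getElem?_getD]

theorem tagStream_eq (cu : List String) (ppn : Nat) (hpp : 0 < ppn)
    (rest : List (List (String × String))) :
    ∀ (i d : Nat), d < cu.length → d * ppn ≤ i → (d < cu.length - 1 → i ≤ (d + 1) * ppn) →
    pvTagStream (ppn : Int) rest (cu.drop d) ((((d + 1) * ppn : Nat) : Int) - (i : Int)) =
      (PySem.List.enumerate rest (i : Int)).map (fun ip =>
        if pvNoGroupA ip.2 then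
          ((PySem.Dict.mk ip.2).insert "groupUrl"
            (PySem.List.pyGetD cu
              (min (PySem.Int.floordiv ip.1 (ppn : Int)) ((cu.length : Int) - 1)) "")).items
        else ip.2) := by
  induction rest with
  | nil => intro i d _ _ _; simp [pvTagStream, PySem.List.enumerate_nil]
  | cons post rest ih =>
    intro i d hd hlo hhi
    rw [PySem.List.enumerate_cons, List.map_cons, pvTagStream]
    have hdroplen : (cu.drop d).length = cu.length - d := by simp
    by_cases hpop : (d + 1) * ppn = i ∧ d < cu.length - 1
    · -- pop: i = (d+1)*ppn and another url remains
      obtain ⟨hieq, hdlt⟩ := hpop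
      have hb1 : (((((d + 1) * ppn : Nat) : Int) - (i : Int)) == 0) = true := by
        rw [beq_iff_eq]; omega
      have hb2 : decide (1 < (cu.drop d).length) = true := by
        rw [decide_eq_true_eq, hdroplen]; omega
      simp only [hb1, hb2, Bool.and_self, if_true]
      have htail : (cu.drop d).tail = cu.drop (d + 1) := by rw [List.tail_drop]
      have hidx : min (PySem.Int.floordiv (i : Int) (ppn : Int)) ((cu.length : Int) - 1)
          = ((d + 1 : Nat) : Int) := by
        rw [PySem.Int.floordiv_natCast]
        have : i / ppn = d + 1 := by
          rw [← hieq]; exact Nat.mul_div_cancel _ hpp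
        rw [this]; push_cast; omega
      have hhead : (cu.drop (d + 1)).headD "" = PySem.List.pyGetD cu ((d + 1 : Nat) : Int) "" := by
        rw [PySem.List.pyGetD_natCast, list_headD_drop]
      rw [htail, List.cons.injEq]
      refine ⟨?_, ?_⟩
      · rw [pvUrlMissing_eq, hidx, ← hhead]
      · have hstep : (d + 1 + 1) * ppn = (d + 1) * ppn + ppn := by ring
        have step := ih (i + 1) (d + 1) (by omega) (by omega) (by intro _; omega)
        have hre : ((ppn : Int) - 1) = ((((d + 1 + 1) * ppn : Nat)) : Int) - ((i + 1 : Nat) : Int) := by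
          have h2 : (d + 1 + 1) * ppn = (d + 1) * ppn + ppn := by ring
          rw [h2, hieq]; push_cast; ring
        rw [hre]
        exact step
    · -- no pop: tag with the current head and decrement the countdown
      have hcond : (((((d + 1) * ppn : Nat) : Int) - (i : Int)) == 0 && decide (1 < (cu.drop d).length)) = false := by
        rcases not_and_or.mp hpop with h | h
        · have hb : (((((d + 1) * ppn : Nat) : Int) - (i : Int)) == 0) = false := by
            rw [beq_eq_false_iff_ne]; omega
          rw [hb, Bool.false_and]
        · have hb : decide (1 < (cu.drop d).length) = false := by
            rw [decide_eq_false_iff_not, hdroplen]; omega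
          rw [hb, Bool.and_false]
      simp only [hcond, Bool.false_eq_true, if_false]
      have hdidx : min (i / ppn) (cu.length - 1) = d := by
        by_cases hdl : d < cu.length - 1
        · have hne : (d + 1) * ppn ≠ i := fun he => hpop ⟨he, hdl⟩
          have hlt : i < (d + 1) * ppn := by have := hhi hdl; omega
          have : i / ppn = d := Nat.div_eq_of_lt_le hlo hlt
          omega
        · have hge : cu.length - 1 ≤ i / ppn := by
            apply (Nat.le_div_iff_mul_le hpp).mpr
            have hdeq : d = cu.length - 1 := by omega
            rw [← hdeq]; exact hlo
          omega
      have hidx : min (PySem.Int.floordiv (i : Int) (ppn : Int)) ((cu.length : Int) - 1)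
          = ((d : Nat) : Int) := by
        rw [PySem.Int.floordiv_natCast]
        have h1 : (1 : Nat) ≤ cu.length := by omega
        push_cast
        omega
      have hhead : (cu.drop d).headD "" = PySem.List.pyGetD cu ((d : Nat) : Int) "" := by
        rw [PySem.List.pyGetD_natCast, list_headD_drop]
      rw [List.cons.injEq]
      refine ⟨?_, ?_⟩
      · rw [pvUrlMissing_eq, hidx, ← hhead]
      · have step := ih (i + 1) d hd (by omega) (by
          intro hdl
          have hne : (d + 1) * ppn ≠ i := fun he => hpop ⟨he, hdl⟩
          have := hhi hdl
          omega)
        have hre : (((((d + 1) * ppn : Nat)) : Int) - (i : Int) - 1)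
            = ((((d + 1) * ppn : Nat)) : Int) - ((i + 1 : Nat) : Int) := by push_cast; ring
        rw [hre]
        exact step

-- ===== VERDICT (by name: the statement is the Claim_ definition above) =====
theorem inject_group_url_py_spec : Claim_equal_inject_group_url_py := by
  intro posts chunk_urls _
  unfold Spec_inject_group_url_py inject_group_url_py inject_group_url_py_alt
  by_cases hp : posts = []
  · simp [hp]
  by_cases hc : chunk_urls = []
  · simp [hc]
  have hcond : (posts.isEmpty || chunk_urls.isEmpty) = false := by simp [hp, hc]
  simp only [hcond, Bool.false_eq_true, if_false]
  have hP : 0 < posts.length := List.length_pos_iff.mpr hp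
  have hG : 0 < chunk_urls.length := List.length_pos_iff.mpr hc
  set ppn : Nat := max 1 (posts.length / chunk_urls.length) with hppn
  have hpp0 : 0 < ppn := by omega
  have hppI : max 1 (PySem.Int.floordiv (posts.length : Int) (chunk_urls.length : Int)) = (ppn : Int) := by
    rw [PySem.Int.floordiv_natCast]; push_cast; omega
  rw [hppI]
  have h := tagStream_eq chunk_urls ppn hpp0 posts 0 0 hG (by omega) (by intro _; omega)
  simp only [List.drop_zero, Nat.cast_zero, sub_zero] at h
  rw [← h]
  norm_num
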